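-- pv_equiv track=rewrite | github.com/supportersimulator/contextdna-ide | memory/knowledge_graph.py | _get_parent_categories
-- ===== SOURCE A (Python) =====
-- def _get_parent_categories(category: str, levels: int) -> list:
--     """Get parent categories up to N levels."""
--     parents = []
--     parts = category.split("/")
--
--     for i in range(1, min(levels + 1, len(parts))):
--         parent = "/".join(parts[:-i])
--         if parent:
--             parents.append(parent)
--
--     return parents
-- ===== SOURCE B (Python) =====
-- def _get_parent_categories(category: str, levels: int) -> list:
--     """Get parent categories up to N levels."""
--     parts = category.split("/")
--     prefixes = []
--     acc = ""
--     for p in parts[:-1]: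
--         acc = p if not prefixes else acc + "/" + p
--         prefixes.append(acc)
--     m = min(levels, len(prefixes))
--     if m < 0:
--         m = 0
--     return [s for s in prefixes[::-1][:m] if s]
-- ===== Notes on version B (the rewrite author's own statement) =====
-- stated objective: alternative
-- what changed: B builds all cumulative '/'-joined parent prefixes in one forward pass (each prefix extends the previous by one segment) and then reverses, truncates to the level budget and filters, instead of A's re-joining a fresh slice of the split parts for every level.
import Mathlib
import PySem

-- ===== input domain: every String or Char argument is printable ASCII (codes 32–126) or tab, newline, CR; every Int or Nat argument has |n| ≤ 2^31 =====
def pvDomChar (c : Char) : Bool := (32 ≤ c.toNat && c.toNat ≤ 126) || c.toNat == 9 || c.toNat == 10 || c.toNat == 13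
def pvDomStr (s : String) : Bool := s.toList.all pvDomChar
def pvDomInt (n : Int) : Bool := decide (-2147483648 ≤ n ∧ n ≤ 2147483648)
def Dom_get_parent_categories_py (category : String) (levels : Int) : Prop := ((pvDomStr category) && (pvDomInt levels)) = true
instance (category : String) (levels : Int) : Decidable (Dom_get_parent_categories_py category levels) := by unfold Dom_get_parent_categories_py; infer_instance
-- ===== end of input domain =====

-- B replaces A's per-level join of a slice by one forward pass building the cumulative
-- prefixes, then reverse/truncate/filter: a different traversal of the same parts list.


-- ===== PORT A =====
-- sep "/" is nonempty, so Str.split? is always `some`; `.getD []` only unwraps it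
def get_parent_categories_py (category : String) (levels : Int) : List String :=
  let parts := (PySem.Str.split? category "/").getD []
  (PySem.List.pyRange 1 (min (levels + 1) (parts.length : Int)) 1).foldl
    (fun parents i =>
      let parent := PySem.Str.join "/" (PySem.List.slice parts none (some (-i)))
      if parent ≠ "" then parents ++ [parent] else parents)
    []

-- ===== PORT B =====
def get_parent_categories_py_alt (category : String) (levels : Int) : List String :=
  let parts := (PySem.Str.split? category "/").getD []
  let st := (PySem.List.slice parts none (some (-1))).foldl
    (fun (st : List String × String) p =>
      let acc := if st.1 = [] then p else st.2 ++ "/" ++ p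
      (st.1 ++ [acc], acc))
    ([], "")
  let prefixes := st.1
  let m := min levels (prefixes.length : Int)
  let m := if m < 0 then 0 else m
  (PySem.List.slice ((PySem.List.slice? prefixes none none (-1)).getD []) none (some m)).filter
    (fun s => s ≠ "")

-- ===== PRECONDITION & SPEC =====
def Spec_get_parent_categories_py (category : String) (levels : Int) (out : List String) : Prop := out = get_parent_categories_py_alt category levels
instance (category : String) (levels : Int) (out : List String) : Decidable (Spec_get_parent_categories_py category levels out) := by unfold Spec_get_parent_categories_py; infer_instance

-- ===== CLAIM (what is proved, stated in full; the proofs are below) =====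
def Claim_equal_get_parent_categories_py : Prop := ∀ (category : String) (levels : Int), Dom_get_parent_categories_py category levels → Spec_get_parent_categories_py category levels (get_parent_categories_py category levels)

-- ===== LEMMAS AND PROOFS =====

-- `join "/"` on a list extended on the right
theorem pvJoin_singleton (p : String) : PySem.Str.join "/" [p] = p := by
  apply String.toList_inj.mp
  simp [PySem.Str.toList_join, PySem.Chars.join_singleton]

theorem pvCharsJoin_append (sep : List Char) (xs : List (List Char)) (x : List Char)
    (h : xs ≠ []) :
    PySem.Chars.join sep (xs ++ [x]) = PySem.Chars.join sep xs ++ sep ++ x := by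
  induction xs with
  | nil => exact absurd rfl h
  | cons a rest ih =>
    cases rest with
    | nil => simp [PySem.Chars.join_cons_cons, PySem.Chars.join_singleton]
    | cons b r =>
      have := ih (by simp)
      simp only [List.cons_append, PySem.Chars.join_cons_cons] at this ⊢
      simp [this]

theorem pvJoin_append (xs : List String) (x : String) (h : xs ≠ []) :
    PySem.Str.join "/" (xs ++ [x]) = PySem.Str.join "/" xs ++ "/" ++ x := by
  apply String.toList_inj.mp
  have hx : List.map String.toList xs ≠ [] := by
    cases xs with
    | nil => exact absurd rfl h
    | cons a r => simp
  simp [PySem.Str.toList_join, pvCharsJoin_append _ _ _ hx]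

-- the list of cumulative prefixes of zs
def pvPl (zs : List String) : List String :=
  (List.range zs.length).map (fun k => PySem.Str.join "/" (zs.take (k + 1)))

theorem pvPl_append (zs : List String) (p : String) :
    pvPl (zs ++ [p]) = pvPl zs ++ [PySem.Str.join "/" (zs ++ [p])] := by
  unfold pvPl
  simp only [List.length_append, List.length_cons, List.length_nil, Nat.zero_add,
    List.range_succ, List.map_append, List.map_cons, List.map_nil]
  congr 1
  · apply List.map_congr_left
    intro k hk
    have hk' : k + 1 ≤ zs.length := by
      have := List.mem_range.mp hk; omega
    rw [List.take_append_of_le_length hk']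
  · rw [List.take_of_length_le (by simp)]

-- the fold of B computes (pvPl zs, join "/" zs)
theorem pvFold_spec (ys zs : List String) :
    ys.foldl
      (fun (st : List String × String) p =>
        let acc := if st.1 = [] then p else st.2 ++ "/" ++ p
        (st.1 ++ [acc], acc))
      (pvPl zs, PySem.Str.join "/" zs)
    = (pvPl (zs ++ ys), PySem.Str.join "/" (zs ++ ys)) := by
  induction ys generalizing zs with
  | nil => simp
  | cons p ys ih =>
    have hstep : (if pvPl zs = [] then p else PySem.Str.join "/" zs ++ "/" ++ p)
        = PySem.Str.join "/" (zs ++ [p]) := by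
      by_cases hz : zs = []
      · subst hz; simp [pvPl, pvJoin_singleton]
      · have hpl : pvPl zs ≠ [] := by
          unfold pvPl
          simpa using fun hlen => hz (List.eq_nil_of_length_eq_zero hlen)
        rw [if_neg hpl, pvJoin_append _ _ hz]
    simp only [List.foldl_cons, hstep]
    rw [← pvPl_append]
    have := ih (zs ++ [p])
    simpa using this

theorem pvFold_spec₀ (ys : List String) :
    ys.foldl
      (fun (st : List String × String) p =>
        let acc := if st.1 = [] then p else st.2 ++ "/" ++ p
        (st.1 ++ [acc], acc))
      ([], "")
    = (pvPl ys, PySem.Str.join "/" ys) := by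
  have h := pvFold_spec ys []
  simpa [pvPl] using h

-- reversing the prefix list
theorem pvPl_reverse (zs : List String) :
    (pvPl zs).reverse
      = (List.range zs.length).map (fun k => PySem.Str.join "/" (zs.take (zs.length - k))) := by
  unfold pvPl
  apply List.ext_getElem
  · simp
  · intro i h1 h2
    simp only [List.length_reverse, List.length_map, List.length_range] at h1
    rw [List.getElem_reverse]
    simp only [List.getElem_map, List.getElem_range, List.length_map, List.length_range]
    congr 2
    omega

-- A's loop as append-of-filtered-map
theorem pvFoldA (f : Int -> String) (l : List Int) (acc : List String) :
    l.foldl (fun parents i => if f i ≠ "" then parents ++ [f i] else parents) acc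
      = acc ++ (l.map f).filter (fun s => decide (s ≠ "")) := by
  induction l generalizing acc with
  | nil => simp
  | cons i l ih =>
    simp only [List.foldl_cons, List.map_cons, List.filter_cons, ih]
    by_cases h : f i = ""
    · simp [h]
    · simp [h]

-- A's loop rewritten as a map over a Nat range
theorem pvA_map (ps : List String) (levels : Int) :
    (PySem.List.pyRange 1 (min (levels + 1) (ps.length : Int)) 1).map
        (fun i => PySem.Str.join "/" (PySem.List.slice ps none (some (-i))))
      = (List.range (min (levels + 1) (ps.length : Int) - 1).toNat).map
          (fun k => PySem.Str.join "/" (ps.take (ps.length - (k + 1)))) := by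
  rw [PySem.List.pyRange_one, List.map_map]
  apply List.map_congr_left
  intro k hk
  simp only [Function.comp_apply]
  congr 1
  have : -(1 + (k : Int)) = -(((k + 1 : Nat) : Int)) := by push_cast; ring
  rw [this, PySem.List.slice_to_neg_natCast ps (k + 1) (by omega)]

-- ===== VERDICT (by name: the statement is the Claim_ definition above) =====
theorem get_parent_categories_py_spec : Claim_equal_get_parent_categories_py := by
  intro category levels _
  unfold Spec_get_parent_categories_py get_parent_categories_py get_parent_categories_py_alt
  generalize (PySem.Str.split? category "/").getD [] = ps
  simp only [PySem.List.slice_to_neg_one, pvFold_spec₀, PySem.List.slice?_none_none_neg_one,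
    Option.getD_some]
  simp only [pvFoldA, List.nil_append]
  rw [pvA_map ps levels, pvPl_reverse]
  set n := ps.dropLast.length with hn
  have hnl : n = ps.length - 1 := by simp [hn]
  set mI : Int := min levels ((pvPl ps.dropLast).length : Int) with hm
  have hpllen : (pvPl ps.dropLast).length = n := by simp only [pvPl, List.length_map, List.length_range, hn]
  have hmn : (if mI < 0 then 0 else mI) = ((min (levels + 1) (ps.length : Int) - 1).toNat : Int) ⊓ (n : Int) := by
    rw [hm, hpllen]
    split_ifs with h <;> omega
  rw [hmn, PySem.List.slice_to _ (by omega)]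
  rw [← List.map_take, List.take_range]
  have htoNat : ((((min (levels + 1) (ps.length : Int) - 1).toNat : Int)) ⊓ (n : Int)).toNat
      = min (min (levels + 1) (ps.length : Int) - 1).toNat n := by omega
  rw [htoNat, min_assoc, min_self]
  have hmm : min (min (levels + 1) (ps.length : Int) - 1).toNat n
      = (min (levels + 1) (ps.length : Int) - 1).toNat := by omega
  rw [hmm]
  congr 1
  apply List.map_congr_left
  intro k hk
  have hkm : k < (min (levels + 1) (ps.length : Int) - 1).toNat := List.mem_range.mp hk
  have hkn' : k < n := by omega
  congr 1
  rw [List.dropLast_eq_take, List.take_take]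
  congr 1
  omega
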